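-- pv_equiv track=rewrite | github.com/marhoy/googleCodeJam | 2018/practice_round/senate_evacuation/senate_evacuation.py | remove_someone
-- ===== SOURCE A (Python) =====
-- def remove_someone(parties):
--     evacuated = ''
--
--     # If there's only three people left, we can only evacuate one
--     if list(parties.values()) == [1, 1, 1]:
--         num_remove = 1
--     else:
--         num_remove = 2
--
--     for _ in range(num_remove):
--         # Get a list of parties sorted by people. Largest party first.
--         keys = sorted(parties, key=parties.get, reverse=True)
--
--         # If the dict is empty, return here
--         if not keys:
--             return evacuated, parties
--
--         # Remove a person from the largest party. Add that person to the evacuation plan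
--         parties[keys[0]] -= 1
--         evacuated += keys[0]
--
--         # If that was the last person from that party: Remove that party from the dict.
--         if parties[keys[0]] == 0:
--             del parties[keys[0]]
--
--     # Return the people to be evacuated and the updated dict of parties
--     return evacuated, parties
-- ===== SOURCE B (Python) =====
-- def _take_first(items, m):
--     # Single forward scan: copy entries until the first one whose count equals m
--     # (the maximum), emit that key with its count decremented (dropped at 1),
--     # then splice on the untouched tail.
--     out = []
--     it = iter(items)
--     for k, v in it:
--         if v == m:
--             if v != 1:
--                 out.append((k, v - 1))
--             out.extend(it)
--             return k, out
--         out.append((k, v))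
--
--
-- def remove_someone(parties):
--     items = list(parties.items())
--     num_remove = 1 if [v for _, v in items] == [1, 1, 1] else 2
--     evacuated = ''
--     for _ in range(num_remove):
--         if not items:
--             break
--         m = max(v for _, v in items)
--         k, items = _take_first(items, m)
--         evacuated += k
--     # A mutates the caller's dict in place; do the same.
--     parties.clear()
--     parties.update(items)
--     return evacuated, parties
-- ===== Notes on version B (the rewrite author's own statement) =====
-- stated objective: alternative
-- what changed: B drops the dict machinery inside the loop: it works on a plain list of (key,count) pairs, computes the maximum count with one max() over the values, and rebuilds the list in a single forward scan that decrements (or drops) the first entry carrying that maximum, instead of sorting the keys of the dict and mutating/deleting dict entries.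
import Mathlib
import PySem

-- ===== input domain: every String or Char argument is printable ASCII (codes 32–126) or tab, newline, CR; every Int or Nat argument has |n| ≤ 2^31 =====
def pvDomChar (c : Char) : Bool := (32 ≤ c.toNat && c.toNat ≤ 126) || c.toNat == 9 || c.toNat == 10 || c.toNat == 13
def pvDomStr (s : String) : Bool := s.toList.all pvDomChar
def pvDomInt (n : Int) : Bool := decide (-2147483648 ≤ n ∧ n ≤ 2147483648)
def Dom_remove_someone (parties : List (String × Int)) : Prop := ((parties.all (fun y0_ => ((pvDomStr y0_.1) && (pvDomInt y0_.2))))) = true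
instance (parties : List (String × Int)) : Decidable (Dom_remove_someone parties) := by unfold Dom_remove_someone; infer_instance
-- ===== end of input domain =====

-- B works on a plain list of (key, count) pairs: one max() over the counts and one
-- forward splice pass per removal, instead of A's per-removal key sort on the dict;
-- equivalence is about the RETURN value (both Pythons mutate the argument dict the same way).

-- ===== PORT A =====
-- loop 'for _ in range(num_remove)' of A, with early return on empty dict
def removeLoopA (n : Nat) (evac : String) (d : PySem.Dict String Int) :
    String × (List (String × Int)) :=
  match n with
  | 0 => (evac, d.items)
  | Nat.succ m =>
    -- keys = sorted(parties, key=parties.get, reverse=True)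
    let keys := PySem.List.sorted d.keys (fun k => d.getD k 0) true
    match keys with
    | [] => (evac, d.items)
    | k :: _ =>
      -- parties[keys[0]] -= 1  (k is a key of d, so parties.get(k) is present; getD's
      -- default is never used)
      let d' := d.insert k (d.getD k 0 - 1)
      if d'.getD k 0 == 0 then removeLoopA m (evac ++ k) (d'.erase k)
      else removeLoopA m (evac ++ k) d'

def remove_someone (parties : List (String × Int)) : String × (List (String × Int)) :=
  let d := PySem.Dict.ofList parties
  let num_remove : Nat := if d.values = [1, 1, 1] then 1 else 2
  removeLoopA num_remove "" d

-- ===== PORT B =====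
-- _take_first(items, m): copy entries until the first one whose count equals m,
-- emit that key with the count decremented (dropped at 1), splice on the rest.
-- ("", out) on [] is unreachable in Source B (m is the max of a nonempty items).
def takeFirst : List (String × Int) → Int → List (String × Int) → String × List (String × Int)
  | [], _, out => ("", out)
  | (k, v) :: rest, m, out =>
    if v == m then
      if v == 1 then (k, out ++ rest) else (k, (out ++ [(k, v - 1)]) ++ rest)
    else takeFirst rest m (out ++ [(k, v)])

-- B's 'for _ in range(num_remove)' loop over the plain items list ('break' = return)
def altLoop : Nat → String → List (String × Int) → String × List (String × Int)
  | 0, evac, items => (evac, items)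
  | Nat.succ p, evac, items =>
    if items.isEmpty then (evac, items)
    else
      -- m = max(v for _, v in items)
      let m := (PySem.List.max? (items.map Prod.snd) (fun y => y)).getD 0
      let r := takeFirst items m []
      altLoop p (evac ++ r.1) r.2

def remove_someone_alt (parties : List (String × Int)) : String × (List (String × Int)) :=
  let items := (PySem.Dict.ofList parties).items
  let num_remove : Nat := if items.map Prod.snd = [1, 1, 1] then 1 else 2
  altLoop num_remove "" items

-- ===== PRECONDITION & SPEC =====
def Spec_remove_someone (parties : List (String × Int)) (out : String × (List (String × Int))) : Prop := out = remove_someone_alt parties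
instance (parties : List (String × Int)) (out : String × (List (String × Int))) : Decidable (Spec_remove_someone parties out) := by unfold Spec_remove_someone; infer_instance

-- ===== CLAIM (what is proved, stated in full; the proofs are below) =====
def Claim_equal_remove_someone : Prop := ∀ (parties : List (String × Int)), Dom_remove_someone parties → Spec_remove_someone parties (remove_someone parties)

-- ===== LEMMAS AND PROOFS =====

-- running max step ('first maximal element wins')
def pvStep {α : Type} (g : α → Int) : Option α → α → Option α
  | none, x => some x
  | some m, x => if g m < g x then some x else some m

theorem max?_eq_foldl_pvStep {α : Type} (g : α → Int) (xs : List α) :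
    PySem.List.max? xs g = List.foldl (pvStep g) none xs := by
  unfold PySem.List.max?
  congr 1
  funext m x
  cases m <;> rfl

theorem foldl_pvStep_keep {α : Type} (g : α → Int) (k : α) (l : List α)
    (h : ∀ x ∈ l, g x ≤ g k) : List.foldl (pvStep g) (some k) l = some k := by
  induction l with
  | nil => rfl
  | cons x t ih =>
    have hx : ¬ g k < g x := by have := h x (by simp); omega
    simp only [List.foldl_cons, pvStep, if_neg hx]
    exact ih (fun y hy => h y (by simp [hy]))

theorem foldl_pvStep_decomp {α : Type} (g : α → Int) (l1 : List α) (k : α) (l2 : List α)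
    (h1 : ∀ x ∈ l1, g x < g k) (h2 : ∀ x ∈ l2, g x ≤ g k) :
    List.foldl (pvStep g) none (l1 ++ k :: l2) = some k := by
  rw [List.foldl_append, List.foldl_cons]
  rcases hc : List.foldl (pvStep g) none l1 with _ | m
  · simpa [pvStep] using foldl_pvStep_keep g k l2 h2
  · have hm : m ∈ l1 := PySem.List.max?_mem (key := g) (by rw [max?_eq_foldl_pvStep]; exact hc)
    have : g m < g k := h1 m hm
    simp only [pvStep, if_pos this]
    exact foldl_pvStep_keep g k l2 h2

theorem max?_decomp {α : Type} (g : α → Int) (l1 : List α) (k : α) (l2 : List α)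
    (h1 : ∀ x ∈ l1, g x < g k) (h2 : ∀ x ∈ l2, g x ≤ g k) :
    PySem.List.max? (l1 ++ k :: l2) g = some k := by
  rw [max?_eq_foldl_pvStep]; exact foldl_pvStep_decomp g l1 k l2 h1 h2

-- head of the descending stable insertion sort = the running max
theorem head_foldl_insertBy (f : String → Int) (xs : List String) (acc : List String) :
    (List.foldl (fun a x => PySem.List.insertBy (fun a b => decide (f b < f a)) x a) acc xs).head? =
    List.foldl (pvStep f) acc.head? xs := by
  induction xs generalizing acc with
  | nil => rfl
  | cons x t ih =>
    simp only [List.foldl_cons]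
    rw [ih]
    congr 1
    cases acc with
    | nil => rfl
    | cons y ys =>
      simp only [PySem.List.insertBy, pvStep]
      by_cases h : f y < f x <;> simp [h]

theorem sorted_rev_head_decomp (g : String → Int) (l1 : List String) (k : String) (l2 : List String)
    (h1 : ∀ x ∈ l1, g x < g k) (h2 : ∀ x ∈ l2, g x ≤ g k) :
    (PySem.List.sorted (l1 ++ k :: l2) g true).head? = some k := by
  rw [PySem.List.sorted_rev_eq_foldl_insertBy, head_foldl_insertBy]
  exact foldl_pvStep_decomp g l1 k l2 h1 h2

-- decomposition of a nonempty list at its FIRST maximal count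
theorem exists_first_argmax :
    ∀ (l : List (String × Int)), l ≠ [] →
      ∃ l1 k v l2, l = l1 ++ (k, v) :: l2 ∧ (∀ p ∈ l1, p.2 < v) ∧ (∀ p ∈ l, p.2 ≤ v) := by
  intro l
  induction l with
  | nil => intro h; exact absurd rfl h
  | cons x t ih =>
    intro _
    by_cases ht : t = []
    · exact ⟨[], x.1, x.2, [], by simp [ht], by simp, by intro p hp; rw [ht] at hp; simp at hp; simp [hp]⟩
    · obtain ⟨l1, k, v, l2, hdec, hlt, hle⟩ := ih ht
      by_cases hx : v ≤ x.2
      · refine ⟨[], x.1, x.2, t, by simp, by simp, ?_⟩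
        intro p hp
        rcases List.mem_cons.mp hp with rfl | hp
        · exact le_refl _
        · have := hle p hp; omega
      · refine ⟨x :: l1, k, v, l2, by simp [hdec], ?_, ?_⟩
        · intro p hp
          rcases List.mem_cons.mp hp with rfl | hp
          · omega
          · exact hlt p hp
        · intro p hp
          rcases List.mem_cons.mp hp with rfl | hp
          · omega
          · exact hle p hp

theorem takeFirst_decomp :
    ∀ (l1 : List (String × Int)) (k : String) (v : Int) (l2 out : List (String × Int)),
      (∀ p ∈ l1, p.2 ≠ v) →
      takeFirst (l1 ++ (k, v) :: l2) v out =
        (k, (if v == 1 then out ++ l1 else (out ++ l1) ++ [(k, v - 1)]) ++ l2) := by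
  intro l1
  induction l1 with
  | nil =>
    intro k v l2 out _
    by_cases h1 : v = 1 <;> simp [takeFirst, h1]
  | cons p t ih =>
    intro k v l2 out h
    have hp : (p.2 == v) = false := by
      simp only [beq_eq_false_iff_ne, ne_eq]; exact h p (by simp)
    obtain ⟨pk, pv⟩ := p
    simp only [List.cons_append, takeFirst, hp, Bool.false_eq_true, if_false]
    rw [ih k v l2 (out ++ [(pk, pv)]) (fun q hq => h q (by simp [hq]))]
    by_cases h1 : v = 1 <;> simp [h1]

-- replacing / deleting the middle entry of a key-distinct decomposition
theorem map_middle (k : String) (v w : Int) (l1 l2 : List (String × Int))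
    (hk1 : ∀ p ∈ l1, p.1 ≠ k) (hk2 : ∀ p ∈ l2, p.1 ≠ k) :
    List.map (fun p => if (p.1 == k) = true then (k, w) else p) (l1 ++ (k, v) :: l2) =
      l1 ++ (k, w) :: l2 := by
  rw [List.map_append, List.map_cons]
  have e1 : List.map (fun p => if (p.1 == k) = true then (k, w) else p) l1 = l1 := by
    rw [List.map_congr_left (g := id) (fun p hp => by simp [hk1 p hp]), List.map_id]
  have e2 : List.map (fun p => if (p.1 == k) = true then (k, w) else p) l2 = l2 := by
    rw [List.map_congr_left (g := id) (fun p hp => by simp [hk2 p hp]), List.map_id]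
  rw [e1, e2]
  simp

theorem filter_middle (k : String) (v : Int) (l1 l2 : List (String × Int))
    (hk1 : ∀ p ∈ l1, p.1 ≠ k) (hk2 : ∀ p ∈ l2, p.1 ≠ k) :
    List.filter (fun p => !(p.1 == k)) (l1 ++ (k, v) :: l2) = l1 ++ l2 := by
  rw [List.filter_append, List.filter_cons]
  have e1 : List.filter (fun p => !(p.1 == k)) l1 = l1 :=
    List.filter_eq_self.mpr (fun p hp => by simp [hk1 p hp])
  have e2 : List.filter (fun p => !(p.1 == k)) l2 = l2 :=
    List.filter_eq_self.mpr (fun p hp => by simp [hk2 p hp])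
  rw [e1, e2]
  simp

-- the two loops agree, tracking d.items as B's plain list
theorem loops_eq (n : Nat) (evac : String) (d : PySem.Dict String Int)
    (hnd : d.keys.Nodup) : removeLoopA n evac d = altLoop n evac d.items := by
  induction n generalizing evac d with
  | zero => rfl
  | succ p ih =>
    by_cases hl : d.items = []
    · have hk : d.keys = [] := by simp [PySem.Dict.keys, hl]
      have hs : PySem.List.sorted d.keys (fun k => d.getD k 0) true = [] :=
        (PySem.List.sorted_eq_nil_iff _ _ _).mpr hk
      rw [removeLoopA, altLoop]
      simp [hs, hl]
    · obtain ⟨l1, k, v, l2, hdec, hlt, hle⟩ := exists_first_argmax d.items hl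
      have hmem : (k, v) ∈ d.items := by rw [hdec]; simp
      have hv : d.getD k 0 = v := PySem.Dict.getD_of_mem_items d hmem hnd 0
      have hkeys : d.keys = l1.map Prod.fst ++ k :: l2.map Prod.fst := by
        simp [PySem.Dict.keys, hdec]
      have hnd' : (l1.map Prod.fst ++ k :: l2.map Prod.fst).Nodup := by
        rw [← hkeys]; exact hnd
      obtain ⟨hndl1, hndk2, hdisj⟩ := List.nodup_append.mp hnd'
      have hk1 : ∀ p ∈ l1, p.1 ≠ k :=
        fun p hp => hdisj p.1 (List.mem_map_of_mem hp) k (by simp)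
      have hk2 : ∀ p ∈ l2, p.1 ≠ k := by
        intro p hp heq
        have := (List.nodup_cons.mp hndk2).1
        exact this (by rw [← heq]; exact List.mem_map_of_mem hp)
      -- value lookup of every key in its segment
      have hget : ∀ p ∈ d.items, d.getD p.1 0 = p.2 := by
        intro p hp
        exact PySem.Dict.getD_of_mem_items d (by simpa using hp) hnd 0
      have h1' : ∀ x ∈ l1.map Prod.fst, d.getD x 0 < d.getD k 0 := by
        intro x hx
        obtain ⟨q, hq, rfl⟩ := List.mem_map.mp hx
        rw [hget q (by rw [hdec]; simp [hq]), hv]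
        exact hlt q hq
      have h2' : ∀ x ∈ l2.map Prod.fst, d.getD x 0 ≤ d.getD k 0 := by
        intro x hx
        obtain ⟨q, hq, rfl⟩ := List.mem_map.mp hx
        rw [hget q (by rw [hdec]; simp [hq]), hv]
        exact hle q (by rw [hdec]; simp [hq])
      have hsort : (PySem.List.sorted d.keys (fun x => d.getD x 0) true).head? = some k := by
        rw [hkeys]
        exact sorted_rev_head_decomp _ _ _ _ h1' h2'
      -- A's one step
      have hcont : d.contains k = true :=
        (PySem.Dict.contains_iff_mem_keys _ _).mpr (by rw [hkeys]; simp)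
      have hins : (d.insert k (v - 1)).items = l1 ++ (k, v - 1) :: l2 := by
        rw [PySem.Dict.items_insert_of_contains d (v - 1) hcont, hdec]
        exact map_middle k v (v - 1) l1 l2 hk1 hk2
      have herase : ((d.insert k (v - 1)).erase k).items = l1 ++ l2 := by
        have : ((d.insert k (v - 1)).erase k).items =
            List.filter (fun p => !(p.1 == k)) (d.insert k (v - 1)).items := rfl
        rw [this, hins]
        exact filter_middle k (v - 1) l1 l2 hk1 hk2
      -- nodup of the successor dicts
      have hnd_ins : (d.insert k (v - 1)).keys.Nodup := by
        have : (d.insert k (v - 1)).keys = l1.map Prod.fst ++ k :: l2.map Prod.fst := by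
          simp [PySem.Dict.keys, hins]
        rw [this]; exact hnd'
      have hnd_er : ((d.insert k (v - 1)).erase k).keys.Nodup := by
        have hkeq : ((d.insert k (v - 1)).erase k).keys = l1.map Prod.fst ++ l2.map Prod.fst := by
          simp [PySem.Dict.keys, herase]
        rw [hkeq]
        have hsub : (l1.map Prod.fst ++ l2.map Prod.fst).Sublist
            (l1.map Prod.fst ++ k :: l2.map Prod.fst) :=
          List.Sublist.append_left (List.sublist_cons_self k _) _
        exact hnd'.sublist hsub
      -- B's one step
      have hsnd : d.items.map Prod.snd = l1.map Prod.snd ++ v :: l2.map Prod.snd := by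
        simp [hdec]
      have hmax : PySem.List.max? (d.items.map Prod.snd) (fun y => y) = some v := by
        rw [hsnd]
        refine max?_decomp _ _ _ _ ?_ ?_
        · intro x hx
          obtain ⟨q, hq, rfl⟩ := List.mem_map.mp hx
          exact hlt q hq
        · intro x hx
          obtain ⟨q, hq, rfl⟩ := List.mem_map.mp hx
          exact hle q (by rw [hdec]; simp [hq])
      have htake : takeFirst d.items v [] =
          (k, (if v == 1 then ([] : List (String × Int)) ++ l1 else (([] : List (String × Int)) ++ l1) ++ [(k, v - 1)]) ++ l2) := by
        rw [hdec]
        exact takeFirst_decomp l1 k v l2 [] (fun q hq => by have := hlt q hq; omega)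
      -- assemble
      rw [removeLoopA, altLoop]
      have hemp : d.items.isEmpty = false := by simp [hl]
      rcases hs : PySem.List.sorted d.keys (fun x => d.getD x 0) true with _ | ⟨a, t⟩
      · rw [hs, List.head?_nil] at hsort; exact absurd hsort (by simp)
      · rw [hs, List.head?_cons] at hsort
        injection hsort with hak
        rw [hak]
        simp only [hemp, Bool.false_eq_true, if_false, hmax, Option.getD_some, htake,
          PySem.Dict.getD_insert_self, hv]
        by_cases h1 : v = 1
        · have hc : (v - 1 == 0) = true := by simp [h1]
          have hc' : (v == 1) = true := by simp [h1]
          simp only [hc, if_true, hc', List.nil_append]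
          rw [ih (evac ++ k) _ hnd_er, herase]
        · have hc : (v - 1 == 0) = false := by simp only [beq_eq_false_iff_ne, ne_eq]; omega
          have hc' : (v == 1) = false := by simp only [beq_eq_false_iff_ne, ne_eq]; exact h1
          simp only [hc, Bool.false_eq_true, if_false, hc', List.nil_append]
          rw [ih (evac ++ k) _ hnd_ins, hins]
          simp

-- ===== VERDICT (by name: the statement is the Claim_ definition above) =====
theorem remove_someone_spec : Claim_equal_remove_someone := by
  intro parties _
  show remove_someone parties = remove_someone_alt parties
  unfold remove_someone remove_someone_alt
  exact loops_eq _ "" _ (PySem.Dict.nodup_keys_ofList parties)
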